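-- pv_equiv track=rewrite | github.com/JFlashy96/Algorithms | CodeSignal/extractEachKth.py | solution
-- ===== SOURCE A (Python) =====
-- def solution(inputArray, k):
-- 	newArray = []
-- 	count = 1
-- 	for i in range(0, len(inputArray)):
-- 		if count % k != 0:
-- 			newArray.append(inputArray[i])
-- 		count += 1
-- 	return newArray
-- ===== SOURCE B (Python) =====
-- def solution(inputArray, k):
--     result = []
--     for start in range(0, len(inputArray), k):
--         result.extend(inputArray[start:start+k-1])
--     return result
-- ===== Notes on version B (the rewrite author's own statement) =====
-- stated objective: alternative
-- what changed: Replaces A's per-element 1-based counter and modulo test with a block traversal: walk the array in strides of k and keep each block's first k-1 elements via slicing.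
-- outside the precondition, e.g. on solution([1, 2, 3], -2): A returns [1, 3], B returns []; on solution([1, 2], 0): A raises ZeroDivisionError, B raises ValueError
import Mathlib
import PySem

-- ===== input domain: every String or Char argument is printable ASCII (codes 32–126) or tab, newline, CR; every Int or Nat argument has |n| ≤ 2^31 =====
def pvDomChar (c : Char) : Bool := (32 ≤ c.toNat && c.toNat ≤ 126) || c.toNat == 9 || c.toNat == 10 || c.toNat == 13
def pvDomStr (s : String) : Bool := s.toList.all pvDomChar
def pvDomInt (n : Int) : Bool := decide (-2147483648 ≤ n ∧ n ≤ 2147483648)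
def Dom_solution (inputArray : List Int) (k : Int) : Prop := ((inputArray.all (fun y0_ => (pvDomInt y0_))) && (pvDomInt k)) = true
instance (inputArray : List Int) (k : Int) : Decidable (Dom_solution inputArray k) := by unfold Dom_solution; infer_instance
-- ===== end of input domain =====

-- B rebuilds the result by block traversal (stride-k slices keeping each block's first k-1 elements)
-- instead of A's per-element 1-based counter with a modulo test; alternative decomposition, same cost.
-- Pre_solution restricts to the natural domain k ≥ 1: A raises ZeroDivisionError at k = 0, and for
-- negative k (outside the task's natural domain) A's modulo test accidentally behaves like |k|.


-- ===== PORT A =====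
-- A's loop: walk the elements in order, keeping a running count starting at 1,
-- appending the element when count % k != 0.  (count % k via PySem.Int.mod, k ≠ 0 in Pre_.)
def solutionGo (xs : List Int) (count : Int) (k : Int) : List Int :=
  match xs with
  | [] => []
  | x :: t => (if PySem.Int.mod count k ≠ 0 then [x] else []) ++ solutionGo t (count + 1) k

def solution (inputArray : List Int) (k : Int) : List Int :=
  solutionGo inputArray 1 k

-- ===== PORT B =====
-- B's loop: blocks of k; keep the first k-1 elements of each block (slice), recurse past the block.
-- km1 = k - 1; the k ≤ 0 guard mirrors Source B, whose range(0, len, k) is empty for k < 0 (k = 0 raises).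
def solutionAltGo (km1 : Nat) (xs : List Int) : List Int :=
  match xs with
  | [] => []
  | x :: t => (x :: t).take km1 ++ solutionAltGo km1 ((x :: t).drop (km1 + 1))
termination_by xs.length
decreasing_by simp

def solution_alt (inputArray : List Int) (k : Int) : List Int :=
  if 1 ≤ k then solutionAltGo (k.toNat - 1) inputArray else []

-- ===== PRECONDITION & SPEC =====
-- Pre_ restricts to the natural domain k ≥ 1: A raises ZeroDivisionError at k = 0; for k < 0
-- (outside the natural domain) A returns the k' = |k| answer while B returns [].
def Pre_solution (inputArray : List Int) (k : Int) : Prop := 1 ≤ k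
instance (inputArray : List Int) (k : Int) : Decidable (Pre_solution inputArray k) := by unfold Pre_solution; infer_instance
def pvWitness_solution : List Int × Int := ([1, 2, 3, 4, 5], 3)

def Spec_solution (inputArray : List Int) (k : Int) (out : List Int) : Prop := out = solution_alt inputArray k
instance (inputArray : List Int) (k : Int) (out : List Int) : Decidable (Spec_solution inputArray k out) := by unfold Spec_solution; infer_instance

-- ===== CLAIM (what is proved, stated in full; the proofs are below) =====
def Claim_equal_solution : Prop := ∀ (inputArray : List Int) (k : Int), Dom_solution inputArray k → Pre_solution inputArray k → Spec_solution inputArray k (solution inputArray k)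

-- ===== LEMMAS AND PROOFS =====

-- A's condition is periodic in the counter (for positive k).
theorem solutionGo_period (xs : List Int) (c k : Int) (hk : 1 ≤ k) :
    solutionGo xs (c + k) k = solutionGo xs c k := by
  induction xs generalizing c with
  | nil => rfl
  | cons x t ih =>
    have hmod : PySem.Int.mod (c + k) k = PySem.Int.mod c k := by
      rw [PySem.Int.mod_eq_emod_of_pos (by omega), PySem.Int.mod_eq_emod_of_pos (by omega)]
      have := Int.add_mul_emod_self_left (a := c) (b := k) (c := 1)
      simpa using this
    have hc1 : c + k + 1 = (c + 1) + k := by ring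
    rw [solutionGo, solutionGo, hmod, hc1, ih (c + 1)]

-- One block of A's loop: starting at counter c (1 ≤ c ≤ k), A keeps the next k - c
-- elements, drops one, and continues with the counter back at 1 (via periodicity).
theorem solutionGo_step (k : Int) (hk : 1 ≤ k) (xs : List Int) (c : Int)
    (h1 : 1 ≤ c) (h2 : c ≤ k) :
    solutionGo xs c k = xs.take (k - c).toNat ++ solutionGo (xs.drop ((k - c).toNat + 1)) 1 k := by
  induction xs generalizing c with
  | nil => simp [solutionGo]
  | cons x t ih =>
    by_cases hc : c = k
    · subst hc
      have hmod : PySem.Int.mod c c = 0 := by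
        rw [PySem.Int.mod_eq_emod_of_pos (by omega)]
        exact Int.emod_self
      have hper : solutionGo t (c + 1) c = solutionGo t 1 c := by
        rw [show c + 1 = 1 + c by ring, solutionGo_period t 1 c hk]
      simp [solutionGo, hmod, hper]
    · have hlt : c < k := lt_of_le_of_ne h2 hc
      have hm : PySem.Int.mod c k = c := by
        rw [PySem.Int.mod_eq_emod_of_pos (by omega)]
        exact Int.emod_eq_of_lt (by omega) hlt
      have hc0 : c ≠ 0 := by omega
      have htn : (k - c).toNat = (k - (c + 1)).toNat + 1 := by omega
      rw [solutionGo]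
      simp only [hm]
      rw [if_pos hc0, ih (c + 1) (by omega) (by omega), htn]
      simp

-- A's loop equals B's block recursion (strong induction on the list length).
theorem go_eq_altGo (k : Int) (hk : 1 ≤ k) :
    ∀ (n : Nat) (xs : List Int), xs.length ≤ n →
      solutionGo xs 1 k = solutionAltGo (k.toNat - 1) xs := by
  intro n
  induction n with
  | zero =>
    intro xs hlen
    have hx : xs = [] := by cases xs <;> simp_all
    subst hx; simp [solutionGo, solutionAltGo]
  | succ m ih =>
    intro xs hlen
    cases xs with
    | nil => simp [solutionGo, solutionAltGo]
    | cons x t =>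
      have h1 : (k - 1).toNat = k.toNat - 1 := by omega
      rw [solutionGo_step k hk (x :: t) 1 le_rfl hk, h1, solutionAltGo]
      congr 1
      have hk1 : 1 ≤ k.toNat := by omega
      have hlen2 : ((x :: t).drop (k.toNat - 1 + 1)).length ≤ m := by
        have h3 : (x :: t).length = t.length + 1 := rfl
        have h4 : t.length + 1 ≤ m + 1 := by simpa using hlen
        rw [List.length_drop, h3]
        omega
      exact ih _ hlen2

-- ===== VERDICT (by name: the statement is the Claim_ definition above) =====
theorem solution_spec : Claim_equal_solution := by
  intro inputArray k _ hpre
  unfold Pre_solution at hpre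
  unfold Spec_solution solution solution_alt
  rw [if_pos hpre]
  exact go_eq_altGo k hpre inputArray.length inputArray le_rfl
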